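-- pv_equiv track=rewrite | github.com/dewi-elisa/Thesis-AI | Code/code article/autocomplete/data.py | tokens_to_encoded_line
-- ===== SOURCE A (Python) =====
-- def tokens_to_encoded_line(tokens):
--     detokenized = []
--     for token in tokens:
--         if token == "<pad>":
--             pass
--         elif token == "<eos>":
--             detokenized.append(token)  # Keep <eos>
--             break
--         else:
--             detokenized.append(token)
--     encoded_line = " ".join(detokenized)
--     return encoded_line
-- ===== SOURCE B (Python) =====
-- def tokens_to_encoded_line(tokens):
--     toks = list(tokens)
--     if "<eos>" in toks:
--         toks = toks[:toks.index("<eos>") + 1]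
--     return " ".join(t for t in toks if t != "<pad>")
-- ===== Notes on version B (the rewrite author's own statement) =====
-- stated objective: simpler
-- what changed: Replaces the single pass with break/skip branches by a locate-then-truncate-then-filter decomposition: find the first '<eos>', slice the list up to and including it, then drop '<pad>' tokens and join.
import Mathlib
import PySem

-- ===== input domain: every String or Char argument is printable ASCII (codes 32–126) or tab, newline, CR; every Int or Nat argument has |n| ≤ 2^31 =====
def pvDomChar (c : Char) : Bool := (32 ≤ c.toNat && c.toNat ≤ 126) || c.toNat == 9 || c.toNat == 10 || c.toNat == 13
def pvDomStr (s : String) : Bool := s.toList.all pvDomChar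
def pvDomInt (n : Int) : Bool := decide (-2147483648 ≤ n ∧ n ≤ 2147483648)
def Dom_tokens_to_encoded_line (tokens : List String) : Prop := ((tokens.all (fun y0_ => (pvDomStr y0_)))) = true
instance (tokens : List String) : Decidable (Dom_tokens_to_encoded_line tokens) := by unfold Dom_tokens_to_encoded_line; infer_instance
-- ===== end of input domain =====

-- B replaces A's single pass-with-break by locate-eos / truncate / filter-pads / join (objective: simpler decomposition).


-- ===== PORT A =====
-- the for-loop with break, as structural recursion over the remaining tokens with the accumulator 'detokenized'
def pvA_loop (acc : List String) : List String → List String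
  | [] => acc
  | t :: ts =>
    if t = "<pad>" then pvA_loop acc ts
    else if t = "<eos>" then acc ++ [t]        -- append then break
    else pvA_loop (acc ++ [t]) ts

def tokens_to_encoded_line (tokens : List String) : String :=
  PySem.Str.join " " (pvA_loop [] tokens)

-- ===== PORT B =====
def tokens_to_encoded_line_alt (tokens : List String) : String :=
  let toks := tokens
  let toks :=
    match PySem.List.index? toks "<eos>" with   -- '"<eos>" in toks' + 'toks.index("<eos>")'
    | some i => PySem.List.slice toks none (some ((i : Int) + 1))
    | none => toks
  PySem.Str.join " " (toks.filter (· != "<pad>"))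

-- ===== PRECONDITION & SPEC =====
def Spec_tokens_to_encoded_line (tokens : List String) (out : String) : Prop := out = tokens_to_encoded_line_alt tokens
instance (tokens : List String) (out : String) : Decidable (Spec_tokens_to_encoded_line tokens out) := by unfold Spec_tokens_to_encoded_line; infer_instance

-- ===== CLAIM (what is proved, stated in full; the proofs are below) =====
def Claim_equal_tokens_to_encoded_line : Prop := ∀ (tokens : List String), Dom_tokens_to_encoded_line tokens → Spec_tokens_to_encoded_line tokens (tokens_to_encoded_line tokens)

-- ===== LEMMAS AND PROOFS =====

-- the list A's loop yields, stated without an accumulator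
def pvSpecList : List String → List String
  | [] => []
  | t :: ts =>
    if t = "<pad>" then pvSpecList ts
    else if t = "<eos>" then [t]
    else t :: pvSpecList ts

theorem pvA_loop_eq (ts : List String) : ∀ acc, pvA_loop acc ts = acc ++ pvSpecList ts := by
  induction ts with
  | nil => intro acc; simp [pvA_loop, pvSpecList]
  | cons t ts ih =>
    intro acc
    by_cases hp : t = "<pad>" <;> by_cases he : t = "<eos>" <;>
      simp [pvA_loop, pvSpecList, hp, he, ih]

theorem pvAlt_list_eq (ts : List String) :
    (match PySem.List.index? ts "<eos>" with
      | some i => PySem.List.slice ts none (some ((i : Int) + 1))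
      | none => ts).filter (· != "<pad>") = pvSpecList ts := by
  induction ts with
  | nil => simp [PySem.List.index?, pvSpecList]
  | cons t ts ih =>
    by_cases he : t = "<eos>"
    · subst he
      rw [PySem.List.index?_cons_self]
      have h1 : ((0 : Nat) : Int) + 1 = ((1 : Nat) : Int) := by norm_num
      simp only [Nat.cast_zero, zero_add]
      have : PySem.List.slice ("<eos>" :: ts) none (some (1 : Int)) =
          ("<eos>" :: ts).take 1 := by
        have := PySem.List.slice_to_natCast ("<eos>" :: ts) 1
        simpa using this
      rw [this]
      simp [pvSpecList]
    · rw [PySem.List.index?_cons_of_ne ts he]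
      cases hidx : PySem.List.index? ts "<eos>" with
      | none =>
        simp only [Option.map_none]
        rw [hidx] at ih
        simp only at ih
        by_cases hp : t = "<pad>" <;>
          simp [pvSpecList, hp, he, bne_iff_ne, ← ih]
      | some i =>
        simp only [Option.map_some]
        rw [hidx] at ih
        simp only at ih
        have hcast : ((i + 1 : Nat) : Int) + 1 = ((i + 2 : Nat) : Int) := by push_cast; ring
        rw [hcast, PySem.List.slice_to_natCast]
        have hslice : PySem.List.slice ts none (some ((i : Int) + 1)) = ts.take (i + 1) := by
          have : ((i : Int) + 1) = ((i + 1 : Nat) : Int) := by push_cast; ring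
          rw [this, PySem.List.slice_to_natCast]
        rw [hslice] at ih
        have htake : (t :: ts).take (i + 2) = t :: ts.take (i + 1) := by simp [List.take]
        rw [htake]
        by_cases hp : t = "<pad>" <;>
          simp [pvSpecList, hp, he, bne_iff_ne, ← ih]

-- ===== VERDICT (by name: the statement is the Claim_ definition above) =====
theorem tokens_to_encoded_line_spec : Claim_equal_tokens_to_encoded_line := by
  intro tokens _
  unfold Spec_tokens_to_encoded_line tokens_to_encoded_line tokens_to_encoded_line_alt
  rw [pvA_loop_eq, ← pvAlt_list_eq]
  simp
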